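-- pv_equiv track=rewrite | github.com/tulip-control/dd | dd/mdd.py | _enumerate_integer
-- ===== SOURCE A (Python) =====
-- import collections.abc as _abc
--
-- def _enumerate_integer(
--         bits:
--             list[str]
--         ) -> _abc.Iterator[
--             dict[str, int]]:
--     n = len(bits)
--     for i in range(int(2**n)):
--         values = list(reversed(bin(i).lstrip('-0b').zfill(n)))
--         d = {bit: int(v) for bit, v in zip(bits, values)}
--         for bit in bits[len(values):]:
--             d[bit] = 0
--         yield d
-- ===== SOURCE B (Python) =====
-- import itertools
--
-- def _enumerate_integer(bits):
--     for combo in itertools.product((0, 1), repeat=len(bits)):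
--         yield {bit: v for bit, v in zip(bits, reversed(combo))}
-- ===== Notes on version B (the rewrite author's own statement) =====
-- stated objective: idiomatic
-- what changed: Replaces the integer-counting loop that decodes each index via bin()/lstrip/zfill string manipulation with itertools.product((0,1), repeat=n), pairing bits with the reversed tuple so bits[0] still flips fastest.
import Mathlib
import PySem

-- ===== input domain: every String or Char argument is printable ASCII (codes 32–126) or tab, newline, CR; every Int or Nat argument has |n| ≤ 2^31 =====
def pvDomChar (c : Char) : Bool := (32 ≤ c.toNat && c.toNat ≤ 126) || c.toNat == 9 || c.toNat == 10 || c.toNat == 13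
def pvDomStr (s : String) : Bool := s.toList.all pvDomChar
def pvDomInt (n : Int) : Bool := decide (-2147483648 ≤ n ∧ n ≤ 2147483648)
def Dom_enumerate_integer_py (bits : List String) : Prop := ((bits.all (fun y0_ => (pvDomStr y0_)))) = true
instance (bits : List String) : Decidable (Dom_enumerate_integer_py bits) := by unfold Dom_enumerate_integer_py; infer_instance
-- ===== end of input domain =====

-- B replaces A's integer-counting + bin()/lstrip/zfill string decoding with itertools.product
-- over (0,1) repeated n times (reversed per tuple, so bits[0] still flips fastest): idiomatic,
-- same asymptotic cost. Equivalence of return values is proved for all inputs.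

-- ===== PORT A =====

-- binary digits of m, least-significant first ([] for m = 0); hand port, exact:
-- bin(m) for m ≥ 0 is "0b" ++ (reverse of these digits, or "0" when m = 0)
def pvLsbChars : Nat → List Char
  | 0 => []
  | (m+1) => (if (m+1) % 2 == 1 then '1' else '0') :: pvLsbChars ((m+1)/2)
  decreasing_by exact Nat.div_lt_of_lt_mul (by omega)

-- int(v) for a single digit character v (here only '0'/'1' occur); exact on digit chars
def pvCharInt (c : Char) : Int := (c.toNat : Int) - 48

def enumerate_integer_py (bits : List String) : List (List (String × Int)) :=
  let n := bits.length
  (PySem.List.pyRange 0 ((2:Int)^n) 1).map (fun i =>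
    -- bin(i) = '0'::'b':: MSB-first digits (pvLsbChars reversed; for i = 0 the digits part is "0",
    -- i.e. '0'::'b'::'0'::[], and dropWhile of the strip set consumes it exactly as lstrip('-0b'))
    let binStr : List Char :=
      '0' :: 'b' :: (if i.toNat = 0 then ['0'] else (pvLsbChars i.toNat).reverse)
    let values : List Char :=
      (PySem.Chars.zfill (binStr.dropWhile (fun c => c == '-' || c == '0' || c == 'b')) (n:Int)).reverse
    let d := (bits.zip values).foldl (fun d p => d.insert p.1 (pvCharInt p.2)) PySem.Dict.empty
    let d := (PySem.List.slice bits (some (values.length : Int)) none).foldl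
               (fun d b => d.insert b (0:Int)) d
    d.items)

-- ===== PORT B =====

-- itertools.product((0,1), repeat=n), in product order (last coordinate fastest)
def pvCombos : Nat → List (List Int)
  | 0 => [[]]
  | (n+1) => (pvCombos n).flatMap (fun c => [c ++ [0], c ++ [1]])

def enumerate_integer_py_alt (bits : List String) : List (List (String × Int)) :=
  (pvCombos bits.length).map (fun combo =>
    ((bits.zip combo.reverse).foldl (fun d p => d.insert p.1 p.2) PySem.Dict.empty).items)

-- ===== PRECONDITION & SPEC =====
def Spec_enumerate_integer_py (bits : List String) (out : List (List (String × Int))) : Prop := out = enumerate_integer_py_alt bits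
instance (bits : List String) (out : List (List (String × Int))) : Decidable (Spec_enumerate_integer_py bits out) := by unfold Spec_enumerate_integer_py; infer_instance

-- ===== CLAIM (what is proved, stated in full; the proofs are below) =====
def Claim_equal_enumerate_integer_py : Prop := ∀ (bits : List String), Dom_enumerate_integer_py bits → Spec_enumerate_integer_py bits (enumerate_integer_py bits)

-- ===== LEMMAS AND PROOFS =====

-- the LSB-first digit list of i, padded with 0s to length n (the common reference value list)
def pvLsbBits : Nat → Nat → List Int
  | 0, _ => []
  | (n+1), i => ((i % 2 : Nat) : Int) :: pvLsbBits n (i / 2)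

theorem pvLsbBits_zero (n : Nat) : pvLsbBits n 0 = List.replicate n 0 := by
  induction n with
  | zero => rfl
  | succ n ih => simp [pvLsbBits, ih, List.replicate_succ]

theorem pvLsbChars_len_le {n i : Nat} (h : i < 2^n) : (pvLsbChars i).length ≤ n := by
  induction n generalizing i with
  | zero => interval_cases i <;> simp [pvLsbChars]
  | succ n ih =>
    match i with
    | 0 => simp [pvLsbChars]
    | (m+1) =>
      rw [pvLsbChars]
      simp only [List.length_cons]
      have : (m+1)/2 < 2^n := by
        have h2 := h; rw [Nat.pow_succ] at h2; omega
      exact Nat.succ_le_succ (ih this)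

theorem pvLsbBits_eq_pad {n i : Nat} (h : i < 2^n) :
    pvLsbBits n i = (pvLsbChars i).map pvCharInt ++
      List.replicate (n - (pvLsbChars i).length) 0 := by
  induction n generalizing i with
  | zero => interval_cases i <;> simp [pvLsbBits, pvLsbChars]
  | succ n ih =>
    match i with
    | 0 => simp [pvLsbChars, pvLsbBits_zero]
    | (m+1) =>
      rw [pvLsbBits, pvLsbChars]
      have h2 : (m+1)/2 < 2^n := by
        have h3 := h; rw [Nat.pow_succ] at h3; omega
      rw [ih h2]
      simp only [List.map_cons, List.cons_append, List.length_cons]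
      congr 1
      · -- head digit
        rcases Nat.mod_two_eq_zero_or_one (m+1) with h1 | h1 <;>
          simp [h1, pvCharInt]
      · rw [Nat.add_sub_add_right]

theorem pvLsbChars_reverse_head {m : Nat} (h : 0 < m) :
    ∃ t, (pvLsbChars m).reverse = '1' :: t := by
  induction m using Nat.strong_induction_on with
  | _ m ih =>
    match m, h with
    | (k+1), _ =>
      rw [pvLsbChars]
      by_cases hk : (k+1)/2 = 0
      · have : k = 0 := by omega
        subst this
        exact ⟨[], by simp [hk, pvLsbChars]⟩
      · obtain ⟨t, ht⟩ := ih ((k+1)/2) (by omega) (by omega)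
        exact ⟨t ++ [if (k+1) % 2 == 1 then '1' else '0'], by simp [ht]⟩

-- A's decoded-and-reversed value list is pvLsbChars i padded right with '0' to length n
theorem pvAValues {n i : Nat} (h : i < 2^n) :
    ((PySem.Chars.zfill
        (('0' :: 'b' :: (if i = 0 then ['0'] else (pvLsbChars i).reverse)).dropWhile
          (fun c => c == '-' || c == '0' || c == 'b')) (n:Int)).reverse)
      = pvLsbChars i ++ List.replicate (n - (pvLsbChars i).length) '0' := by
  have hlen := pvLsbChars_len_le h
  by_cases h0 : i = 0
  · subst h0
    simp only [if_pos rfl]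
    have : (['0','b','0'] : List Char).dropWhile (fun c => c == '-' || c == '0' || c == 'b')
        = [] := by decide
    show ((PySem.Chars.zfill ((['0','b','0'] : List Char).dropWhile _) _).reverse) = _
    rw [this]
    have hz : PySem.Chars.zfill [] (n:Int) = List.replicate n '0' := by
      rw [PySem.Chars.zfill.eq_def]
      split
      · next hle =>
          simp only [List.length_nil, Int.natCast_zero] at hle
          have hn0 : n = 0 := by omega
          subst hn0; simp
      · simp
    rw [hz]
    simp [pvLsbChars]
  · obtain ⟨t, ht⟩ := pvLsbChars_reverse_head (Nat.pos_of_ne_zero h0)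
    have hdw : ('0' :: 'b' :: (if i = 0 then ['0'] else (pvLsbChars i).reverse)).dropWhile
        (fun c => c == '-' || c == '0' || c == 'b') = (pvLsbChars i).reverse := by
      rw [if_neg h0, ht]
      simp [List.dropWhile]
    rw [hdw]
    have hrl : (pvLsbChars i).reverse.length = (pvLsbChars i).length := List.length_reverse
    rw [PySem.Chars.zfill.eq_def]
    by_cases hle : (n:Int) ≤ ((pvLsbChars i).reverse.length : Int)
    · rw [if_pos hle]
      have : (pvLsbChars i).length = n := by omega
      simp [this]
    · rw [if_neg hle, ht]
      have hne : ¬ ('1' = '+' ∨ '1' = '-') := by decide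
      dsimp only
      rw [if_neg hne]
      rw [← ht]
      simp only [List.reverse_append, List.reverse_cons, List.reverse_reverse,
        List.reverse_replicate]
      simp [ht, hrl]
      have hlt : t.length + 1 = (pvLsbChars i).length := by
        rw [← hrl, ht, List.length_cons]
      omega

-- product order: pvCombos n lists the MSB-first digit vectors of 0, 1, …, 2^n − 1
theorem pvRange_double {α : Type} (m : Nat) (f : Nat → α) :
    (List.range (2*m)).map f = (List.range m).flatMap (fun j => [f (2*j), f (2*j+1)]) := by
  induction m with
  | zero => rfl
  | succ m ih =>
    have : 2*(m+1) = (2*m + 1) + 1 := by omega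
    rw [this, List.range_succ, List.range_succ, List.range_succ]
    simp only [List.map_append, List.flatMap_append, ih]
    simp

theorem pvCombos_eq (n : Nat) :
    pvCombos n = (List.range (2^n)).map (fun i => (pvLsbBits n i).reverse) := by
  induction n with
  | zero => rfl
  | succ n ih =>
    rw [pvCombos, ih]
    rw [List.flatMap_map]
    have h2 : 2^(n+1) = 2*(2^n) := by rw [Nat.pow_succ]; omega
    rw [h2, pvRange_double]
    apply List.flatMap_congr  -- may not exist; fallback below
    intro j hj
    have e1 : pvLsbBits (n+1) (2*j) = 0 :: pvLsbBits n j := by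
      rw [pvLsbBits]
      congr 1
      · simp [Nat.mul_mod_right]
      · congr 1; omega
    have e2 : pvLsbBits (n+1) (2*j+1) = 1 :: pvLsbBits n j := by
      rw [pvLsbBits]
      congr 1
      · omega
      · congr 1; omega
    rw [e1, e2]
    simp

-- the two dict-building folds agree once the value lists correspond under pvCharInt
theorem pvFold_eq (bits : List String) (vals : List Char) (d : PySem.Dict String Int) :
    (bits.zip vals).foldl (fun d p => d.insert p.1 (pvCharInt p.2)) d
      = (bits.zip (vals.map pvCharInt)).foldl (fun d p => d.insert p.1 p.2) d := by
  rw [List.zip_map_right, List.foldl_map]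
  rfl

-- ===== VERDICT (by name: the statement is the Claim_ definition above) =====
theorem enumerate_integer_py_spec : Claim_equal_enumerate_integer_py := by
  intro bits _
  unfold Spec_enumerate_integer_py
  dsimp only [enumerate_integer_py, enumerate_integer_py_alt]
  rw [pvCombos_eq]
  have hcast : ((2:Int)^bits.length) = ((2^bits.length : Nat) : Int) := by push_cast; ring
  rw [hcast, PySem.List.pyRange_zero_natCast]
  rw [List.map_map, List.map_map]
  apply List.map_congr_left
  intro j hj
  have hj' : j < 2^bits.length := List.mem_range.mp hj
  simp only [Function.comp]
  have htn : ((j:Int)).toNat = j := Int.toNat_natCast j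
  rw [htn]
  rw [pvAValues hj']
  -- lengths: values has length exactly bits.length
  have hlen := pvLsbChars_len_le hj'
  have hvlen : (pvLsbChars j ++ List.replicate (bits.length - (pvLsbChars j).length) '0').length
      = bits.length := by simp; omega
  rw [hvlen]
  rw [PySem.List.slice_from_natCast]
  rw [List.drop_length]
  simp only [List.foldl_nil]
  rw [pvFold_eq]
  congr 2
  rw [List.reverse_reverse]
  rw [pvLsbBits_eq_pad hj']
  simp
  rw [show pvCharInt '0' = 0 from by decide]
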